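-- pv_equiv track=rewrite | github.com/Seunghyun0606/algorithm | 과거풀이/11번가/1번.py | solution
-- ===== SOURCE A (Python) =====
-- def solution(S):
--
--     result = 0
--     cnt = 0
--     for s in S:
--         if s == 'a':
--             if cnt == 2:
--                 return -1
--             cnt += 1
--
--         else:
--             if cnt == 1:
--                 result += 1
--             elif cnt == 2:
--                 result += 0
--             else:
--                 result += 2
--             cnt = 0
--     else:
--         if cnt == 1:
--             result += 1
--         elif cnt == 0:
--             result += 2
--
--     return result
-- ===== SOURCE B (Python) =====
-- def solution(S):
--     if 'aaa' in S:
--         return -1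
--     return 2 * len(S) + 2 - 3 * S.count('a')
-- ===== Notes on version B (the rewrite author's own statement) =====
-- stated objective: simpler
-- what changed: Replaces the per-character state machine (run counter with early return) by a closed form: -1 iff 'aaa' occurs as a substring, otherwise 2*len(S)+2-3*S.count('a'), with no explicit character loop.
import Mathlib
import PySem

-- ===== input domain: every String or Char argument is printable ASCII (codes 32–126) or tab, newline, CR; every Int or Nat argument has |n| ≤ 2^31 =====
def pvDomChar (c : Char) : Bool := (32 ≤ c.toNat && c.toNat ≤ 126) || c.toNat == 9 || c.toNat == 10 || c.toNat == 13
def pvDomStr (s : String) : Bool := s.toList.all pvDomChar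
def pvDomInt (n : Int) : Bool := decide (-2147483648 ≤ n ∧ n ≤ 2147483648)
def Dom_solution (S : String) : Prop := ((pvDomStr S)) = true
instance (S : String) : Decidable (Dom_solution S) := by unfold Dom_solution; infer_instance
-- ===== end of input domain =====

-- B replaces A's per-character run-counting state machine by a closed form (-1 iff "aaa" occurs, else 2*len+2-3*count 'a'); objective: simpler.


-- ===== PORT A =====
-- literal port of A's for-loop with state (result, cnt) and the for-else epilogue
def solutionGo : List Char → Int → Int → Int
  | [], result, cnt =>
      if cnt == 1 then result + 1 else if cnt == 0 then result + 2 else result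
  | c :: rest, result, cnt =>
      if c == 'a' then
        if cnt == 2 then -1 else solutionGo rest result (cnt + 1)
      else
        solutionGo rest (result + (if cnt == 1 then 1 else if cnt == 2 then 0 else 2)) 0

def solution (S : String) : Int := solutionGo S.toList 0 0

-- ===== PORT B =====
def solution_alt (S : String) : Int :=
  if PySem.Str.isIn "aaa" S then -1
  else 2 * (PySem.Str.len S : Int) + 2 - 3 * (PySem.Str.count S "a" : Int)

-- ===== PRECONDITION & SPEC =====
def Spec_solution (S : String) (out : Int) : Prop := out = solution_alt S
instance (S : String) (out : Int) : Decidable (Spec_solution S out) := by unfold Spec_solution; infer_instance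

-- ===== CLAIM (what is proved, stated in full; the proofs are below) =====
def Claim_equal_solution : Prop := ∀ (S : String), Dom_solution S → Spec_solution S (solution S)

-- ===== LEMMAS AND PROOFS =====

-- 'pvBad cnt l': starting with a run of cnt consecutive 'a's already seen, A's scan over l hits a third consecutive 'a' (A returns -1)
def pvBad : Int → List Char → Bool
  | _, [] => false
  | cnt, c :: rest => if c = 'a' then (cnt == 2 || pvBad (cnt + 1) rest) else pvBad 0 rest

-- the pattern whose occurrence as a PREFIX of the remaining input completes a triple, given the current run length
def pvPfx (cnt : Int) : List Char :=
  if cnt = 1 then ['a', 'a'] else if cnt = 2 then ['a'] else ['a', 'a', 'a']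

lemma solutionGo_closed (l : List Char) : ∀ (res cnt : Int), cnt = 0 ∨ cnt = 1 ∨ cnt = 2 →
    solutionGo l res cnt =
      if pvBad cnt l then -1
      else res + 2 * l.length + 2 - 3 * (l.count 'a' : Int) - cnt := by
  induction l with
  | nil =>
      intro res cnt h
      rcases h with h | h | h <;> subst h <;> simp [solutionGo, pvBad] <;> omega
  | cons c rest ih =>
      intro res cnt h
      by_cases hc : c = 'a'
      · subst hc
        rcases h with h | h | h <;> subst h
        · rw [show solutionGo ('a' :: rest) res 0 = solutionGo rest res 1 from by
              simp [solutionGo]]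
          rw [show pvBad 0 ('a' :: rest) = pvBad 1 rest from by simp [pvBad]]
          rw [ih res 1 (by omega)]
          simp [List.count_cons]
          split_ifs <;> push_cast <;> ring
        · rw [show solutionGo ('a' :: rest) res 1 = solutionGo rest res 2 from by
              simp [solutionGo]]
          rw [show pvBad 1 ('a' :: rest) = pvBad 2 rest from by simp [pvBad]]
          rw [ih res 2 (by omega)]
          simp [List.count_cons]
          split_ifs <;> push_cast <;> ring
        · simp [solutionGo, pvBad]
      · have hcc : ¬ ('a' = c) := fun h => hc h.symm
        rcases h with h | h | h <;> subst h
        · rw [show solutionGo (c :: rest) res 0 = solutionGo rest (res + 2) 0 from by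
              simp [solutionGo, hc]]
          rw [show pvBad 0 (c :: rest) = pvBad 0 rest from by simp [pvBad, hc]]
          rw [ih (res + 2) 0 (by omega)]
          simp [List.count_cons, hcc]
          split_ifs <;> push_cast <;> ring
        · rw [show solutionGo (c :: rest) res 1 = solutionGo rest (res + 1) 0 from by
              simp [solutionGo, hc]]
          rw [show pvBad 1 (c :: rest) = pvBad 0 rest from by simp [pvBad, hc]]
          rw [ih (res + 1) 0 (by omega)]
          simp [List.count_cons, hcc]
          split_ifs <;> push_cast <;> ring
        · rw [show solutionGo (c :: rest) res 2 = solutionGo rest (res + 0) 0 from by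
              simp [solutionGo, hc]]
          rw [show pvBad 2 (c :: rest) = pvBad 0 rest from by simp [pvBad, hc]]
          rw [ih (res + 0) 0 (by omega)]
          simp [List.count_cons, hcc]
          split_ifs <;> push_cast <;> ring

lemma pvBad_iff (l : List Char) : ∀ (cnt : Int), cnt = 0 ∨ cnt = 1 ∨ cnt = 2 →
    (pvBad cnt l = true ↔ (pvPfx cnt <+: l ∨ ['a', 'a', 'a'] <:+: l)) := by
  induction l with
  | nil =>
      intro cnt h
      rcases h with h | h | h <;> subst h <;> simp [pvBad, pvPfx]
  | cons c rest ih =>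
      intro cnt h
      by_cases hc : c = 'a'
      · subst hc
        rcases h with h | h | h <;> subst h
        · rw [show pvBad 0 ('a' :: rest) = pvBad 1 rest from by simp [pvBad]]
          rw [ih 1 (by omega)]
          simp [pvPfx, List.cons_prefix_cons, List.infix_cons_iff]
          try tauto
        · rw [show pvBad 1 ('a' :: rest) = pvBad 2 rest from by simp [pvBad]]
          rw [ih 2 (by omega)]
          have h21 : ['a', 'a'] <+: rest → ['a'] <+: rest := fun hp =>
            (show ['a'] <+: ['a', 'a'] from by simp [List.cons_prefix_cons]).trans hp
          simp [pvPfx, List.cons_prefix_cons, List.infix_cons_iff]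
          try tauto
        · rw [show pvBad 2 ('a' :: rest) = true from by simp [pvBad]]
          simp [pvPfx, List.cons_prefix_cons]
      · have hcc : ¬ ('a' = c) := fun h => hc h.symm
        rcases h with h | h | h <;> subst h <;>
        · rw [show pvBad _ (c :: rest) = pvBad 0 rest from by simp [pvBad, hc]]
          rw [ih 0 (by omega)]
          have habs : ['a', 'a', 'a'] <+: rest → ['a', 'a', 'a'] <:+: rest :=
            List.IsPrefix.isInfix
          simp [pvPfx, List.cons_prefix_cons, List.infix_cons_iff, hcc]
          try tauto

lemma countGo_single (fuel : Nat) : ∀ (l : List Char) (acc : Nat), l.length ≤ fuel →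
    PySem.Chars.count.go ['a'] fuel l acc = acc + l.count 'a' := by
  induction fuel with
  | zero =>
      intro l acc h
      have hl : l = [] := List.length_eq_zero_iff.mp (Nat.le_zero.mp h)
      subst hl; simp [PySem.Chars.count.go]
  | succ n ih =>
      intro l acc h
      cases l with
      | nil => simp [PySem.Chars.count.go]
      | cons c t =>
          simp only [PySem.Chars.count.go]
          by_cases hc : c = 'a'
          · subst hc
            rw [if_pos (by simp [List.isPrefixOf])]
            simp only [List.length_cons] at h
            rw [show List.drop ['a'].length ('a' :: t) = t from by simp]
            rw [ih t (acc + 1) (by omega)]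
            simp [List.count_cons]
            omega
          · have hcc : ¬ ('a' = c) := fun h' => hc h'.symm
            rw [if_neg (by simp [List.isPrefixOf, hcc])]
            simp only [List.length_cons] at h
            rw [ih t acc (by omega)]
            simp [List.count_cons, hcc]
            try exact hc

lemma strCount_a (S : String) : PySem.Str.count S "a" = S.toList.count 'a' := by
  rw [PySem.Str.count_eq]
  show PySem.Chars.count S.toList ['a'] = _
  simp only [PySem.Chars.count, List.isEmpty_cons]
  rw [if_neg (by simp)]
  exact (countGo_single S.toList.length S.toList 0 le_rfl).trans (by omega)

-- ===== VERDICT (by name: the statement is the Claim_ definition above) =====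
theorem solution_spec : Claim_equal_solution := by
  intro S _
  unfold Spec_solution solution solution_alt
  rw [solutionGo_closed S.toList 0 0 (Or.inl rfl)]
  rw [strCount_a]
  by_cases hi : PySem.Str.isIn "aaa" S = true
  · have hinf : ['a', 'a', 'a'] <:+: S.toList := by
      have := (PySem.Str.isIn_iff_infix (sub := "aaa") (s := S)).mp hi
      simpa using this
    rw [if_pos ((pvBad_iff S.toList 0 (Or.inl rfl)).mpr (Or.inr hinf)), if_pos hi]
  · have hni : ¬ ['a', 'a', 'a'] <:+: S.toList := by
      intro hcon
      exact hi ((PySem.Str.isIn_iff_infix (sub := "aaa") (s := S)).mpr (by simpa using hcon))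
    have hb : pvBad 0 S.toList = false := by
      rw [Bool.eq_false_iff]
      intro hcon
      rcases (pvBad_iff S.toList 0 (Or.inl rfl)).mp hcon with hp | hif
      · exact hni (by simpa [pvPfx] using hp.isInfix)
      · exact hni hif
    rw [if_neg (by simp [hb]), if_neg hi]
    have hlen : (PySem.Str.len S : Int) = (S.toList.length : Int) := by
      simp [PySem.Str.len]
    rw [hlen]; ring
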